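-- pv_equiv track=rewrite | github.com/Vicsicard/selfcast-App-2 | style_profiler/utils/md_loader.py | extract_speaker_content
-- ===== SOURCE A (Python) =====
-- from typing import Tuple
--
-- def extract_speaker_content(content: str) -> Tuple[str, int]:
--     """
--     Extract only Speaker 2's content from the transcript.
--
--     Args:
--         content (str): Raw markdown content
--
--     Returns:
--         Tuple[str, int]: (filtered content, number of chunks)
--     """
--     lines = content.split('\n')
--     included_lines = []
--     current_chunk = []
--     in_speaker2_block = False
--     chunk_count = 0
--
--     for line in lines:
--         # Start of a new chunk
--         if line.startswith('## [Chunk'):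
--             # Save previous chunk if it had Speaker 2 content
--             if current_chunk and in_speaker2_block:
--                 included_lines.extend(current_chunk)
--                 chunk_count += 1
--             current_chunk = [line]
--             in_speaker2_block = False
--             continue
--
--         # Add timestamp line if in a chunk
--         if line.startswith('**Timestamp'):
--             current_chunk.append(line)
--             continue
--
--         # Check for Speaker 2's lines
--         if line.startswith('> Speaker 2:'):
--             in_speaker2_block = True
--             current_chunk.append(line)
--             continue
--
--         # Include continuation lines from Speaker 2
--         if in_speaker2_block and line.startswith('>'):
--             current_chunk.append(line)
--             continue
--
--         # Empty lines within a chunk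
--         if in_speaker2_block and not line.strip():
--             current_chunk.append(line)
--
--     # Don't forget the last chunk
--     if current_chunk and in_speaker2_block:
--         included_lines.extend(current_chunk)
--         chunk_count += 1
--
--     return '\n'.join(included_lines), chunk_count
-- ===== SOURCE B (Python) =====
-- from typing import Tuple
--
-- def extract_speaker_content(content: str) -> Tuple[str, int]:
--     """Group the lines into chunk segments first, then keep each segment that
--     contains a Speaker 2 line, selecting its lines by position relative to the
--     first Speaker 2 line."""
--     lines = content.split('\n')
--     # Pass 1: split into segments; a '## [Chunk' header starts a new segment.
--     segments = [[]]
--     for line in lines: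
--         if line.startswith('## [Chunk'):
--             segments.append([line])
--         else:
--             segments[-1].append(line)
--     # Pass 2: keep a segment iff it has a '> Speaker 2:' line.
--     kept = []
--     count = 0
--     for seg in segments:
--         i = 0
--         while i < len(seg) and not seg[i].startswith('> Speaker 2:'):
--             i += 1
--         head, tail = seg[:i], seg[i:]
--         if tail:
--             kept += [l for l in head
--                      if l.startswith('## [Chunk') or l.startswith('**Timestamp')]
--             kept += [l for l in tail
--                      if l.startswith('**Timestamp') or l.startswith('>') or not l.strip()]
--             count += 1
--     return '\n'.join(kept), count
-- ===== Notes on version B (the rewrite author's own statement) =====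
-- stated objective: alternative
-- what changed: Replaces A's single streaming state machine (flush current chunk on each header) by a two-pass group-then-filter: first split the lines into chunk segments, then keep each segment containing a Speaker 2 line, selecting its lines by position relative to the first Speaker 2 line instead of threading an in_block flag.
import Mathlib
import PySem

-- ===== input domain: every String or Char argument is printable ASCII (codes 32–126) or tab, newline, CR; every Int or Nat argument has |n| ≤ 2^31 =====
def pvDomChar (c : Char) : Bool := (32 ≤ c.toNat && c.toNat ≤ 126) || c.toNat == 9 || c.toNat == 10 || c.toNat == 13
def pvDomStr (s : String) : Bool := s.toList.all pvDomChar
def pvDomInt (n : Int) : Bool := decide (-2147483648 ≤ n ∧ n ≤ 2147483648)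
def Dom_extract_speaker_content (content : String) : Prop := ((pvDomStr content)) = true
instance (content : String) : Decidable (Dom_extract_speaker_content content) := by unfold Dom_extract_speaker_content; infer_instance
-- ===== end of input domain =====

-- B replaces A's single streaming flush-on-header state machine by a two-pass
-- group-then-filter shape (split into chunk segments, then keep each segment that
-- contains a Speaker 2 line, selecting lines by position relative to the first
-- Speaker 2 line); objective: alternative decomposition, same behaviour.

-- shared line predicates (both Pythons test the same string prefixes)
def pvIsHdr (l : List Char) : Bool := PySem.Chars.startswith l "## [Chunk".toList
def pvIsTs (l : List Char) : Bool := PySem.Chars.startswith l "**Timestamp".toList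
def pvIsSpk (l : List Char) : Bool := PySem.Chars.startswith l "> Speaker 2:".toList
def pvIsQ (l : List Char) : Bool := PySem.Chars.startswith l ['>']
def pvIsBlank (l : List Char) : Bool := PySem.Chars.strip l == []

-- ===== PORT A =====
def pvAStep (st : List (List Char) × List (List Char) × Bool × Int) (line : List Char) :
    List (List Char) × List (List Char) × Bool × Int :=
  if pvIsHdr line then
    if !st.2.1.isEmpty && st.2.2.1 then (st.1 ++ st.2.1, [line], false, st.2.2.2 + 1)
    else (st.1, [line], false, st.2.2.2)
  else if pvIsTs line then (st.1, st.2.1 ++ [line], st.2.2.1, st.2.2.2)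
  else if pvIsSpk line then (st.1, st.2.1 ++ [line], true, st.2.2.2)
  else if st.2.2.1 && pvIsQ line then (st.1, st.2.1 ++ [line], st.2.2.1, st.2.2.2)
  else if st.2.2.1 && pvIsBlank line then (st.1, st.2.1 ++ [line], st.2.2.1, st.2.2.2)
  else st

def extract_speaker_content (content : String) : String × Int :=
  let lines := PySem.Chars.splitOn content.toList ['\n']
  let st := lines.foldl pvAStep ([], [], false, 0)
  if !st.2.1.isEmpty && st.2.2.1 then
    (String.ofList (PySem.Chars.join ['\n'] (st.1 ++ st.2.1)), st.2.2.2 + 1)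
  else
    (String.ofList (PySem.Chars.join ['\n'] st.1), st.2.2.2)

-- ===== PORT B =====
def pvKeepHead (l : List Char) : Bool := pvIsHdr l || pvIsTs l
def pvKeepTail (l : List Char) : Bool := pvIsTs l || pvIsQ l || pvIsBlank l

def pvSplitStep (st : List (List (List Char)) × List (List Char)) (line : List Char) :
    List (List (List Char)) × List (List Char) :=
  if pvIsHdr line then (st.1 ++ [st.2], [line]) else (st.1, st.2 ++ [line])

def pvBSegStep (st : List (List Char) × Int) (seg : List (List Char)) : List (List Char) × Int :=
  let tail := seg.dropWhile (fun l => !pvIsSpk l)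
  if tail.isEmpty then st
  else (st.1 ++ (seg.takeWhile (fun l => !pvIsSpk l)).filter pvKeepHead
             ++ tail.filter pvKeepTail, st.2 + 1)

def extract_speaker_content_alt (content : String) : String × Int :=
  let lines := PySem.Chars.splitOn content.toList ['\n']
  let s := lines.foldl pvSplitStep ([], [])
  let out := (s.1 ++ [s.2]).foldl pvBSegStep ([], 0)
  (String.ofList (PySem.Chars.join ['\n'] out.1), out.2)

-- ===== PRECONDITION & SPEC =====
def Spec_extract_speaker_content (content : String) (out : String × Int) : Prop := out = extract_speaker_content_alt content
instance (content : String) (out : String × Int) : Decidable (Spec_extract_speaker_content content out) := by unfold Spec_extract_speaker_content; infer_instance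

-- ===== CLAIM (what is proved, stated in full; the proofs are below) =====
def Claim_equal_extract_speaker_content : Prop := ∀ (content : String), Dom_extract_speaker_content content → Spec_extract_speaker_content content (extract_speaker_content content)

-- ===== LEMMAS AND PROOFS =====

-- per-segment replay of A's current-chunk state (proof-only helper)
def pvCStep (st : List (List Char) × Bool) (line : List Char) : List (List Char) × Bool :=
  if pvIsHdr line then ([line], false)
  else if pvIsTs line then (st.1 ++ [line], st.2)
  else if pvIsSpk line then (st.1 ++ [line], true)
  else if st.2 && pvIsQ line then (st.1 ++ [line], st.2)
  else if st.2 && pvIsBlank line then (st.1 ++ [line], st.2)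
  else st

def pvCur (cur : List (List Char)) : List (List Char) × Bool := cur.foldl pvCStep ([], false)

def pvBFold (ds : List (List (List Char))) : List (List Char) × Int := ds.foldl pvBSegStep ([], 0)

-- a raw current segment has its header (if any) only in front
def pvWF (cur : List (List Char)) : Prop := ∀ l ∈ cur.tail, pvIsHdr l = false

-- prefix facts between the four tested prefixes
lemma pvSpk_isQ {l : List Char} (h : pvIsSpk l = true) : pvIsQ l = true := by
  rw [pvIsSpk, PySem.Chars.startswith_iff] at h
  rw [pvIsQ, PySem.Chars.startswith_iff]
  exact List.IsPrefix.trans (by decide) h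

lemma pvSpk_not_ts {l : List Char} (h : pvIsSpk l = true) : pvIsTs l = false := by
  rw [pvIsSpk, PySem.Chars.startswith_iff] at h
  rw [pvIsTs]
  by_contra hh
  rw [Bool.not_eq_false, PySem.Chars.startswith_iff] at hh
  rcases List.prefix_or_prefix_of_prefix hh h with hc | hc
  · exact absurd hc (by decide)
  · exact absurd hc (by decide)

lemma pvHdr_not_spk {l : List Char} (h : pvIsHdr l = true) : pvIsSpk l = false := by
  rw [pvIsHdr, PySem.Chars.startswith_iff] at h
  rw [pvIsSpk]
  by_contra hh
  rw [Bool.not_eq_false, PySem.Chars.startswith_iff] at hh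
  rcases List.prefix_or_prefix_of_prefix hh h with hc | hc
  · exact absurd hc (by decide)
  · exact absurd hc (by decide)

lemma pvSpkHead : ∀ (seg : List (List Char)) (s : List Char) (ss : List (List Char)),
    seg.dropWhile (fun l => !pvIsSpk l) = s :: ss → pvIsSpk s = true := by
  intro seg
  induction seg with
  | nil => intro s ss h; simp [List.dropWhile] at h
  | cons a t ih =>
    intro s ss h
    by_cases ha : pvIsSpk a
    · simp [List.dropWhile, ha] at h
      exact h.1 ▸ ha
    · simp [List.dropWhile, ha] at h
      exact ih s ss h

-- flag already set: every further qualifying line is collected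
lemma pvFT : ∀ (seg : List (List Char)), (∀ l ∈ seg, pvIsHdr l = false) →
    ∀ c, seg.foldl pvCStep (c, true) = (c ++ seg.filter pvKeepTail, true) := by
  intro seg
  induction seg with
  | nil => intro _ c; simp
  | cons a t ih =>
    intro hfree c
    have ha : pvIsHdr a = false := hfree a (by simp)
    have ht : ∀ l ∈ t, pvIsHdr l = false := fun l hl => hfree l (by simp [hl])
    by_cases hts : pvIsTs a
    · simp only [List.foldl_cons, pvCStep, ha, hts]
      simp only [Bool.false_eq_true, if_false, if_true]
      rw [ih ht (c ++ [a])]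
      simp [pvKeepTail, hts]
    · by_cases hsp : pvIsSpk a
      · simp only [List.foldl_cons, pvCStep, ha, hts]
        simp only [Bool.false_eq_true, if_false, hsp, if_true]
        rw [ih ht (c ++ [a])]
        simp [pvKeepTail, hts, pvSpk_isQ hsp]
      · by_cases hq : pvIsQ a
        · simp only [List.foldl_cons, pvCStep, ha, hts, hsp]
          simp only [Bool.false_eq_true, if_false, Bool.true_and, hq, if_true]
          rw [ih ht (c ++ [a])]
          simp [pvKeepTail, hts, hq]
        · by_cases hb : pvIsBlank a
          · simp only [List.foldl_cons, pvCStep, ha, hts, hsp, hq]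
            simp only [Bool.false_eq_true, if_false, Bool.true_and, hb, if_true]
            rw [ih ht (c ++ [a])]
            simp [pvKeepTail, hts, hq, hb]
          · simp only [List.foldl_cons, pvCStep, ha, hts, hsp, hq, hb]
            simp only [Bool.false_eq_true, if_false, Bool.true_and]
            rw [ih ht c]
            simp [pvKeepTail, hts, hq, hb]

-- full replay of a header-free segment from a clear flag
lemma pvFree : ∀ (seg : List (List Char)), (∀ l ∈ seg, pvIsHdr l = false) →
    ∀ c, seg.foldl pvCStep (c, false) =
      (c ++ (seg.takeWhile (fun l => !pvIsSpk l)).filter pvIsTs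
         ++ (seg.dropWhile (fun l => !pvIsSpk l)).filter pvKeepTail,
       !(seg.dropWhile (fun l => !pvIsSpk l)).isEmpty) := by
  intro seg
  induction seg with
  | nil => intro _ c; simp
  | cons a t ih =>
    intro hfree c
    have ha : pvIsHdr a = false := hfree a (by simp)
    have ht : ∀ l ∈ t, pvIsHdr l = false := fun l hl => hfree l (by simp [hl])
    by_cases hsp : pvIsSpk a
    · have hts : pvIsTs a = false := pvSpk_not_ts hsp
      simp only [List.foldl_cons, pvCStep, ha, hts, hsp]
      simp only [Bool.false_eq_true, if_false, if_true]
      rw [pvFT t ht (c ++ [a])]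
      simp [hsp, pvKeepTail, hts, pvSpk_isQ hsp]
    · by_cases hts : pvIsTs a
      · simp only [List.foldl_cons, pvCStep, ha, hts]
        simp only [Bool.false_eq_true, if_false, if_true]
        rw [ih ht (c ++ [a])]
        simp [hsp, hts]
      · simp only [List.foldl_cons, pvCStep, ha, hts, hsp]
        simp only [Bool.false_eq_true, if_false, Bool.false_and, if_false]
        rw [ih ht c]
        simp [hsp, hts]

-- the crux: A's end-of-segment flush IS B's segment step
lemma pvSegKey (cur : List (List Char)) (k : List (List Char)) (n : Int) (hwf : pvWF cur) :
    (if !(pvCur cur).1.isEmpty && (pvCur cur).2 then (k ++ (pvCur cur).1, n + 1) else (k, n))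
      = pvBSegStep (k, n) cur := by
  cases cur with
  | nil => simp [pvCur, pvBSegStep]
  | cons h rest =>
    have hrest : ∀ l ∈ rest, pvIsHdr l = false := hwf
    by_cases hh : pvIsHdr h
    · have hcur : pvCur (h :: rest) = rest.foldl pvCStep ([h], false) := by
        simp [pvCur, List.foldl_cons, pvCStep, hh]
      rw [hcur, pvFree rest hrest [h]]
      have hns : pvIsSpk h = false := pvHdr_not_spk hh
      rcases hd : rest.dropWhile (fun l => !pvIsSpk l) with _ | ⟨s, ss⟩
      · simp [pvBSegStep, hns, hd]
      · have hs : pvIsSpk s = true := pvSpkHead rest s ss hd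
        have hsq : pvKeepTail s = true := by simp [pvKeepTail, pvSpk_isQ hs]
        have hfc : (rest.takeWhile (fun l => !pvIsSpk l)).filter pvKeepHead
            = (rest.takeWhile (fun l => !pvIsSpk l)).filter pvIsTs := by
          apply List.filter_congr
          intro x hx
          have hx' : x ∈ rest := (List.takeWhile_sublist _).subset hx
          simp [pvKeepHead, hrest x hx']
        simp only [pvBSegStep, List.dropWhile_cons, hns, Bool.not_false, if_true, hd,
          List.takeWhile_cons, List.isEmpty_cons]
        simp [hsq, hfc, pvKeepHead, hh]
    · have hfreeall : ∀ l ∈ h :: rest, pvIsHdr l = false := by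
        intro l hl
        rcases List.mem_cons.mp hl with rfl | hl'
        · exact eq_false_of_ne_true hh
        · exact hrest l hl'
      have hcur : pvCur (h :: rest) = (h :: rest).foldl pvCStep ([], false) := rfl
      rw [hcur, pvFree (h :: rest) hfreeall []]
      rcases hd : (h :: rest).dropWhile (fun l => !pvIsSpk l) with _ | ⟨s, ss⟩
      · simp [pvBSegStep, hd]
      · have hs : pvIsSpk s = true := pvSpkHead (h :: rest) s ss hd
        have hsq : pvKeepTail s = true := by simp [pvKeepTail, pvSpk_isQ hs]
        have hfc : ((h :: rest).takeWhile (fun l => !pvIsSpk l)).filter pvKeepHead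
            = ((h :: rest).takeWhile (fun l => !pvIsSpk l)).filter pvIsTs := by
          apply List.filter_congr
          intro x hx
          have hx' : x ∈ h :: rest := (List.takeWhile_sublist _).subset hx
          simp [pvKeepHead, hfreeall x hx']
        simp only [pvBSegStep, hd, List.isEmpty_cons]
        simp [hsq, hfc]

lemma pvWF_singleton (l : List Char) : pvWF [l] := by
  intro m hm; simp at hm

lemma pvWF_append {cur : List (List Char)} {l : List Char}
    (h : pvWF cur) (hl : pvIsHdr l = false) : pvWF (cur ++ [l]) := by
  intro m hm
  cases cur with
  | nil => simp at hm
  | cons a t =>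
    simp only [List.cons_append, List.tail_cons] at hm
    rcases List.mem_append.mp hm with hm' | hm'
    · exact h m hm'
    · simp at hm'; exact hm' ▸ hl

lemma pvWF_split : ∀ (lines : List (List Char)) (ds : List (List (List Char)))
    (cur : List (List Char)), pvWF cur → pvWF (lines.foldl pvSplitStep (ds, cur)).2 := by
  intro lines
  induction lines with
  | nil => intro ds cur h; exact h
  | cons l t ih =>
    intro ds cur h
    by_cases hl : pvIsHdr l
    · simpa [List.foldl_cons, pvSplitStep, hl] using ih (ds ++ [cur]) [l] (pvWF_singleton l)
    · simpa [List.foldl_cons, pvSplitStep, hl] using ih ds (cur ++ [l])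
        (pvWF_append h (eq_false_of_ne_true hl))

lemma pvAStep_nonhdr (inc : List (List Char)) (c : List (List Char)) (f : Bool) (n : Int)
    (l : List Char) (hl : pvIsHdr l = false) :
    pvAStep (inc, c, f, n) l = (inc, (pvCStep (c, f) l).1, (pvCStep (c, f) l).2, n) := by
  simp only [pvAStep, pvCStep, hl]
  simp only [Bool.false_eq_true, if_false]
  split_ifs <;> rfl

lemma pvCur_append (cur : List (List Char)) (l : List Char) :
    pvCur (cur ++ [l]) = pvCStep (pvCur cur) l := by
  simp [pvCur, List.foldl_append]

-- the simulation: A's streaming fold tracks B's segment decomposition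
lemma pvMain : ∀ (lines : List (List Char)) (ds : List (List (List Char)))
    (cur : List (List Char)) (inc0 : List (List Char)) (cnt0 : Int), pvWF cur →
    lines.foldl pvAStep
        (inc0 ++ (pvBFold ds).1, (pvCur cur).1, (pvCur cur).2, cnt0 + (pvBFold ds).2)
      = (inc0 ++ (pvBFold (lines.foldl pvSplitStep (ds, cur)).1).1,
         (pvCur (lines.foldl pvSplitStep (ds, cur)).2).1,
         (pvCur (lines.foldl pvSplitStep (ds, cur)).2).2,
         cnt0 + (pvBFold (lines.foldl pvSplitStep (ds, cur)).1).2) := by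
  intro lines
  induction lines with
  | nil => intro ds cur inc0 cnt0 _; rfl
  | cons l t ih =>
    intro ds cur inc0 cnt0 hwf
    by_cases hl : pvIsHdr l
    · have hflush : pvAStep (inc0 ++ (pvBFold ds).1, (pvCur cur).1, (pvCur cur).2,
          cnt0 + (pvBFold ds).2) l
          = (inc0 ++ (pvBFold (ds ++ [cur])).1, (pvCur [l]).1, (pvCur [l]).2,
             cnt0 + (pvBFold (ds ++ [cur])).2) := by
        have hseg := pvSegKey cur (pvBFold ds).1 (pvBFold ds).2 hwf
        have hbf : pvBFold (ds ++ [cur]) = pvBSegStep (pvBFold ds) cur := by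
          simp [pvBFold, List.foldl_append]
        have hcl : pvCur [l] = ([l], false) := by
          simp [pvCur, pvCStep, hl]
        rw [hbf, ← hseg, hcl]
        simp only [pvAStep, hl, if_true]
        split_ifs with hcond
        · simp [List.append_assoc, add_assoc]
        · rfl
      rw [List.foldl_cons, hflush, ih (ds ++ [cur]) [l] inc0 cnt0 (pvWF_singleton l)]
      simp [List.foldl_cons, pvSplitStep, hl]
    · have hl' : pvIsHdr l = false := eq_false_of_ne_true hl
      rw [List.foldl_cons, pvAStep_nonhdr _ _ _ _ _ hl', ← pvCur_append cur l,
        ih ds (cur ++ [l]) inc0 cnt0 (pvWF_append hwf hl')]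
      simp [List.foldl_cons, pvSplitStep, hl]

-- ===== VERDICT (by name: the statement is the Claim_ definition above) =====
theorem extract_speaker_content_spec : Claim_equal_extract_speaker_content := by
  intro content _
  unfold Spec_extract_speaker_content extract_speaker_content extract_speaker_content_alt
  dsimp only
  set lines := PySem.Chars.splitOn content.toList ['\n'] with hlines
  have h0 := pvMain lines [] [] [] 0 (by intro m hm; simp at hm)
  simp only [pvBFold, List.foldl_nil, pvCur, List.append_nil, List.nil_append, add_zero,
    zero_add] at h0
  have h0' : lines.foldl pvAStep ([], [], false, 0)
      = ((pvBFold (lines.foldl pvSplitStep ([], [])).1).1,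
         (pvCur (lines.foldl pvSplitStep ([], [])).2).1,
         (pvCur (lines.foldl pvSplitStep ([], [])).2).2,
         (pvBFold (lines.foldl pvSplitStep ([], [])).1).2) := by
    simpa [pvBFold, pvCur] using h0
  rw [h0']
  set s := lines.foldl pvSplitStep ([], []) with hs
  have hkey := pvSegKey s.2 (pvBFold s.1).1 (pvBFold s.1).2 (pvWF_split lines [] [] (by intro m hm; simp at hm))
  have hb : (s.1 ++ [s.2]).foldl pvBSegStep ([], 0) = pvBSegStep (pvBFold s.1) s.2 := by
    simp [pvBFold, List.foldl_append]
  rw [hb, ← hkey]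
  split_ifs with hcond
  · rfl
  · rfl
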